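-- pv_equiv track=rewrite | github.com/KaustubhLall/algorithmic-solvability-experiment | src/evaluation.py | _classification_error_taxonomy
-- ===== SOURCE A (Python) =====
-- from typing import Any, Dict, List, Optional, Tuple
--
-- def _classification_error_taxonomy(
--     predictions: List[str],
--     ground_truth: List[str],
--     labels: List[str],
-- ) -> Dict[str, int]:
--     """Categorize classification errors.
--
--     Error types:
--     - "correct": prediction matches ground truth
--     - "wrong_class": prediction is a valid class but wrong
--     - "unknown_class": prediction is not in the known label set
--     """
--     taxonomy: Dict[str, int] = {
--         "correct": 0,
--         "wrong_class": 0,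
--         "unknown_class": 0,
--     }
--     label_set = set(labels)
--
--     for pred, true in zip(predictions, ground_truth):
--         if pred == true:
--             taxonomy["correct"] += 1
--         elif pred in label_set:
--             taxonomy["wrong_class"] += 1
--         else:
--             taxonomy["unknown_class"] += 1
--
--     return taxonomy
-- ===== SOURCE B (Python) =====
-- from typing import Dict, List
--
-- def _classification_error_taxonomy(
--     predictions: List[str],
--     ground_truth: List[str],
--     labels: List[str],
-- ) -> Dict[str, int]:
--     # Count only the mismatched predictions, aggregate them into a frequency
--     # table, and derive all three buckets by arithmetic: correct = total -
--     # mismatches, wrong_class = sum of frequencies of known labels, unknown =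
--     # the rest.  Membership is tested once per DISTINCT mismatched prediction.
--     pairs = list(zip(predictions, ground_truth))
--     total = len(pairs)
--     mismatched = [p for p, t in pairs if p != t]
--     freq: Dict[str, int] = {}
--     for p in mismatched:
--         freq[p] = freq.get(p, 0) + 1
--     label_set = set(labels)
--     wrong = sum(c for p, c in freq.items() if p in label_set)
--     return {
--         "correct": total - len(mismatched),
--         "wrong_class": wrong,
--         "unknown_class": len(mismatched) - wrong,
--     }
-- ===== Notes on version B (the rewrite author's own statement) =====
-- stated objective: alternative
-- what changed: Instead of A's single loop branching every pair into three counters, B filters out only the mismatched predictions, aggregates them into a frequency dict so the label-set membership test runs once per distinct mismatched prediction, and derives all three buckets arithmetically (correct = total - mismatches, wrong = sum of known-label frequencies, unknown = the remainder).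
import Mathlib
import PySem

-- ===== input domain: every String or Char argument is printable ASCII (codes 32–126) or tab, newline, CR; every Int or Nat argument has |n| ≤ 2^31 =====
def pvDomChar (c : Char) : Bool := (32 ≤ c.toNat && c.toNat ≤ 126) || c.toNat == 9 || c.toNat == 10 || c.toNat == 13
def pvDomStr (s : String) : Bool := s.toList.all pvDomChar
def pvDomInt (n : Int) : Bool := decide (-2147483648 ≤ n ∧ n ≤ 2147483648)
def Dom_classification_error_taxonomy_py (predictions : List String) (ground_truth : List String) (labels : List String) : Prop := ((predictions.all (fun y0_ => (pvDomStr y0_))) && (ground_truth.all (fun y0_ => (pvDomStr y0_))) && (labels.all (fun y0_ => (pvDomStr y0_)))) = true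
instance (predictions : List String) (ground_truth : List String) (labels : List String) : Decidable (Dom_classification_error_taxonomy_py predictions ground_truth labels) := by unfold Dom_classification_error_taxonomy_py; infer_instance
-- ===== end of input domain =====

-- B replaces A's three-way branching loop by a mismatch filter + frequency dict and
-- derives the three buckets by subtraction (alternative decomposition, same cost).

-- ===== PORT A =====
-- one loop over zip(predictions, ground_truth), branching into three dict counters
def classification_error_taxonomy_py (predictions : List String) (ground_truth : List String) (labels : List String) : List (String × Int) :=
  let taxonomy : PySem.Dict String Int :=
    ((PySem.Dict.empty.insert "correct" 0).insert "wrong_class" 0).insert "unknown_class" 0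
  let label_set := PySem.Set.ofList labels
  let final := (predictions.zip ground_truth).foldl (fun d pt =>
    if pt.1 == pt.2 then d.modify "correct" 0 (· + 1)
    else if PySem.Set.contains label_set pt.1 then d.modify "wrong_class" 0 (· + 1)
    else d.modify "unknown_class" 0 (· + 1)) taxonomy
  final.items

-- ===== PORT B =====
-- filter the mismatched predictions, build a frequency dict over them (freq.get loop),
-- sum the frequencies of known labels, derive the other two buckets by subtraction
def classification_error_taxonomy_py_alt (predictions : List String) (ground_truth : List String) (labels : List String) : List (String × Int) :=
  let pairs := predictions.zip ground_truth
  let total : Int := pairs.length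
  let mismatched := (pairs.filter (fun pt => pt.1 != pt.2)).map (·.1)
  let freq := mismatched.foldl (fun d p => d.insert p (d.getD p 0 + 1)) PySem.Dict.empty
  let label_set := PySem.Set.ofList labels
  let wrong : Int := ((freq.items.filter (fun pc => PySem.Set.contains label_set pc.1)).map (·.2)).sum
  [("correct", total - mismatched.length),
   ("wrong_class", wrong),
   ("unknown_class", (mismatched.length : Int) - wrong)]

-- ===== PRECONDITION & SPEC =====
def Spec_classification_error_taxonomy_py (predictions : List String) (ground_truth : List String) (labels : List String) (out : List (String × Int)) : Prop := out = classification_error_taxonomy_py_alt predictions ground_truth labels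
instance (predictions : List String) (ground_truth : List String) (labels : List String) (out : List (String × Int)) : Decidable (Spec_classification_error_taxonomy_py predictions ground_truth labels out) := by unfold Spec_classification_error_taxonomy_py; infer_instance

-- ===== CLAIM (what is proved, stated in full; the proofs are below) =====
def Claim_equal_classification_error_taxonomy_py : Prop := ∀ (predictions : List String) (ground_truth : List String) (labels : List String), Dom_classification_error_taxonomy_py predictions ground_truth labels → Spec_classification_error_taxonomy_py predictions ground_truth labels (classification_error_taxonomy_py predictions ground_truth labels)

-- ===== LEMMAS AND PROOFS =====

-- A's fold over any three-counter dict literal adds the three counts to the counters.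
theorem taxonomy_foldl_items (ls : PySem.Set String) (l : List (String × String)) :
    ∀ (c w u : Int),
      (l.foldl (fun d pt =>
        if pt.1 == pt.2 then d.modify "correct" 0 (· + 1)
        else if PySem.Set.contains ls pt.1 then d.modify "wrong_class" 0 (· + 1)
        else d.modify "unknown_class" 0 (· + 1))
        (PySem.Dict.mk [("correct", c), ("wrong_class", w), ("unknown_class", u)])).items
      = [("correct", c + (l.countP (fun pt => pt.1 == pt.2) : Int)),
         ("wrong_class", w + (l.countP (fun pt => pt.1 != pt.2 && PySem.Set.contains ls pt.1) : Int)),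
         ("unknown_class", u + (l.countP (fun pt => pt.1 != pt.2 && !PySem.Set.contains ls pt.1) : Int))] := by
  induction l with
  | nil => intro c w u; simp
  | cons pt rest ih =>
    intro c w u
    rw [List.foldl_cons]
    by_cases h : pt.1 == pt.2
    · rw [if_pos h,
        show (PySem.Dict.mk [("correct", c), ("wrong_class", w), ("unknown_class", u)]).modify "correct" 0 (· + 1)
          = PySem.Dict.mk [("correct", c + 1), ("wrong_class", w), ("unknown_class", u)] from rfl,
        ih,
        List.countP_cons_of_pos (by simpa using h),
        List.countP_cons_of_neg (by simp_all [bne]),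
        List.countP_cons_of_neg (by simp_all [bne])]
      push_cast
      ring_nf
    · rw [if_neg (by simp [h])]
      by_cases hl : PySem.Set.contains ls pt.1
      · rw [if_pos hl,
          show (PySem.Dict.mk [("correct", c), ("wrong_class", w), ("unknown_class", u)]).modify "wrong_class" 0 (· + 1)
            = PySem.Dict.mk [("correct", c), ("wrong_class", w + 1), ("unknown_class", u)] from rfl,
          ih,
          List.countP_cons_of_neg (by simpa using h),
          List.countP_cons_of_pos (by simp_all [bne]),
          List.countP_cons_of_neg (by simp_all [bne])]
        push_cast
        ring_nf
      · rw [if_neg hl,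
          show (PySem.Dict.mk [("correct", c), ("wrong_class", w), ("unknown_class", u)]).modify "unknown_class" 0 (· + 1)
            = PySem.Dict.mk [("correct", c), ("wrong_class", w), ("unknown_class", u + 1)] from rfl,
          ih,
          List.countP_cons_of_neg (by simpa using h),
          List.countP_cons_of_neg (by simp_all [bne]),
          List.countP_cons_of_pos (by simp_all [bne])]
        push_cast
        ring_nf

-- Summing the counter's frequencies over the keys satisfying q is countP q.
theorem sum_counter_filter (l : List String) (q : String → Bool) :
    ((((PySem.Dict.counter l).items.filter (fun pc => q pc.1)).map (·.2)).sum : Int)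
      = (l.countP q : Int) := by
  rw [PySem.Dict.items_counter]
  rw [List.filter_map, List.map_map]
  have hperm : (PySem.Set.ofList l).Perm l.dedup := by
    apply (List.perm_ext_iff_of_nodup (PySem.Set.nodup_ofList l) l.nodup_dedup).mpr
    intro x
    simp [PySem.Set.mem_ofList, List.mem_dedup]
  have h2 := ((hperm.filter q).map (fun k => (l.count k : Int))).sum_eq
  calc ((((PySem.Set.ofList l).filter (fun k => q k)).map (fun k => (l.count k : Int))).sum : Int)
      = (((l.dedup.filter q).map (fun k => (l.count k : Int))).sum) := by
        simpa using h2
    _ = (((l.dedup.filter q).map (l.count ·)).sum : Int) := by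
        rw [show (fun k => ((List.count k l : Nat) : Int)) = (Nat.cast ∘ fun k => List.count k l) from rfl, ← List.map_map, ← Nat.cast_list_sum]
    _ = (l.countP q : Int) := by
        rw [List.sum_map_count_dedup_filter_eq_countP]

-- B computes exactly the three counts A accumulates.
theorem alt_eq_counts (predictions ground_truth labels : List String) :
    classification_error_taxonomy_py_alt predictions ground_truth labels
    = [("correct", ((predictions.zip ground_truth).countP (fun pt => pt.1 == pt.2) : Int)),
       ("wrong_class", ((predictions.zip ground_truth).countP (fun pt => pt.1 != pt.2 && PySem.Set.contains (PySem.Set.ofList labels) pt.1) : Int)),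
       ("unknown_class", ((predictions.zip ground_truth).countP (fun pt => pt.1 != pt.2 && !PySem.Set.contains (PySem.Set.ofList labels) pt.1) : Int))] := by
  unfold classification_error_taxonomy_py_alt
  simp only []
  set pairs := predictions.zip ground_truth with hp
  set S := PySem.Set.ofList labels with hS
  set mism := (pairs.filter (fun pt => pt.1 != pt.2)).map (·.1) with hmism
  have hfreq : mism.foldl (fun d p => d.insert p (d.getD p 0 + 1)) PySem.Dict.empty = PySem.Dict.counter mism :=
    PySem.Dict.foldl_insert_getD_add_one_eq_counter mism
  rw [hfreq]
  have hw : ((((PySem.Dict.counter mism).items.filter (fun pc => PySem.Set.contains S pc.1)).map (·.2)).sum : Int)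
      = (mism.countP (fun x => PySem.Set.contains S x) : Int) := sum_counter_filter mism _
  rw [hw]
  have hml : mism.length = pairs.countP (fun pt => pt.1 != pt.2) := by
    rw [hmism, List.length_map, ← List.countP_eq_length_filter]
  have hcw : mism.countP (fun x => PySem.Set.contains S x)
      = pairs.countP (fun pt => pt.1 != pt.2 && PySem.Set.contains S pt.1) := by
    rw [hmism, List.countP_map, List.countP_filter]
    apply List.countP_congr
    intro a _
    simp [Function.comp, Bool.and_comm]
  have hlen : pairs.countP (fun pt => pt.1 == pt.2) + pairs.countP (fun pt => pt.1 != pt.2) = pairs.length := by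
    have h := List.length_eq_countP_add_countP (l := pairs) (p := fun pt => pt.1 == pt.2)
    rw [show (fun a : String × String => decide ¬((a.1 == a.2) = true)) = (fun pt : String × String => pt.1 != pt.2) from funext fun a => by by_cases hx : a.1 = a.2 <;> simp [bne, hx]] at h
    omega
  have hsplit : pairs.countP (fun pt => pt.1 != pt.2 && PySem.Set.contains S pt.1)
      + pairs.countP (fun pt => pt.1 != pt.2 && !PySem.Set.contains S pt.1)
      = pairs.countP (fun pt => pt.1 != pt.2) := by
    have h := List.length_eq_countP_add_countP (l := pairs.filter (fun pt => pt.1 != pt.2)) (p := fun pt => PySem.Set.contains S pt.1)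
    rw [show (fun a : String × String => decide ¬(PySem.Set.contains S a.1 = true)) = (fun pt : String × String => !PySem.Set.contains S pt.1) from funext fun a => by simp] at h
    rw [← List.countP_eq_length_filter, List.countP_filter, List.countP_filter] at h
    rw [show (fun pt : String × String => pt.1 != pt.2 && PySem.Set.contains S pt.1) = (fun pt => PySem.Set.contains S pt.1 && pt.1 != pt.2) from funext (fun pt => Bool.and_comm _ _),
        show (fun pt : String × String => pt.1 != pt.2 && !PySem.Set.contains S pt.1) = (fun pt => !PySem.Set.contains S pt.1 && pt.1 != pt.2) from funext (fun pt => Bool.and_comm _ _)]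
    omega
  rw [hcw, hml]
  simp only [List.cons.injEq, Prod.mk.injEq, and_true]
  refine ⟨⟨trivial, ?_⟩, trivial, trivial, ?_⟩ <;> omega

-- ===== VERDICT (by name: the statement is the Claim_ definition above) =====
theorem classification_error_taxonomy_py_spec : Claim_equal_classification_error_taxonomy_py := by
  intro predictions ground_truth labels _
  unfold Spec_classification_error_taxonomy_py
  unfold classification_error_taxonomy_py
  rw [alt_eq_counts]
  have h0 : ((PySem.Dict.empty.insert "correct" (0 : Int)).insert "wrong_class" 0).insert "unknown_class" 0
      = PySem.Dict.mk [("correct", 0), ("wrong_class", 0), ("unknown_class", 0)] := rfl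
  simp only [h0]
  rw [taxonomy_foldl_items (PySem.Set.ofList labels)]
  simp
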